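-- pv_equiv track=rewrite | github.com/981377660LMT/algorithm-study | 5_map/经典题/哈希表统计/1224. 最大相等频率-有序集合维护有序的频率.py | maxEqualFreq2
-- ===== SOURCE A (Python) =====
-- from typing import List
-- from collections import Counter
--
-- def maxEqualFreq2(nums: List[int]) -> int:
--     """分三种情况讨论
--
--     1. 最大出现次数 maxFreq == 1 随意删除一个元素
--     2. 所有数出现次数都是 maxFreq 或者 maxFreq - 1, 且只有一个数出现次数是 maxFreq
--     3. 除开一个数，其他所有数的出现次数都是 maxFreq, 且只有一个数出现次数是 1
--     """
--
--     def check(size: int, maxFreq: int, freqCounter: "Counter[int]") -> bool: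
--         """size个元素, counter是元素出现次数, freqCounter是出现次数的频率"""
--         if maxFreq == 1:
--             return True
--         if (
--             freqCounter[maxFreq] * maxFreq + freqCounter[maxFreq - 1] * (maxFreq - 1) == i + 1
--             and freqCounter[maxFreq] == 1
--         ):
--             return True
--         if freqCounter[1] == 1 and freqCounter[maxFreq] * maxFreq + 1 == size:
--             return True
--         return False
--
--     counter, freqCounter = Counter(), Counter()
--     res, maxFreq = 0, 0
--     for i, num in enumerate(nums):
--         counter[num] += 1
--         freqCounter[counter[num]] += 1
--         if counter[num] != 1:
--             freqCounter[counter[num] - 1] -= 1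
--         maxFreq = max(maxFreq, counter[num])
--         if check(i + 1, maxFreq, freqCounter):
--             res = i + 1
--     return res
-- ===== SOURCE B (Python) =====
-- from typing import List
-- from collections import Counter
--
--
-- def maxEqualFreq2(nums: List[int]) -> int:
--     # Scan candidate prefix lengths from longest to shortest and return the
--     # first one whose multiset of element frequencies can be fixed by one
--     # deletion; the frequencies are recomputed from scratch for each prefix.
--     for L in range(len(nums), 0, -1):
--         vals = list(Counter(nums[:L]).values())
--         m = max(vals)
--         if (
--             m == 1
--             or (vals.count(m) == 1 and vals.count(m) * m + vals.count(m - 1) * (m - 1) == L)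
--             or (vals.count(1) == 1 and vals.count(m) * m + 1 == L)
--         ):
--             return L
--     return 0
-- ===== Notes on version B (the rewrite author's own statement) =====
-- stated objective: simpler
-- what changed: A maintains element counts, a counter-of-counts and a running max incrementally in one forward pass; B drops all incremental state and instead scans candidate prefix lengths from longest to shortest, rebuilding the frequency multiset of each prefix with a fresh Counter and returning the first valid length.
import Mathlib
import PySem

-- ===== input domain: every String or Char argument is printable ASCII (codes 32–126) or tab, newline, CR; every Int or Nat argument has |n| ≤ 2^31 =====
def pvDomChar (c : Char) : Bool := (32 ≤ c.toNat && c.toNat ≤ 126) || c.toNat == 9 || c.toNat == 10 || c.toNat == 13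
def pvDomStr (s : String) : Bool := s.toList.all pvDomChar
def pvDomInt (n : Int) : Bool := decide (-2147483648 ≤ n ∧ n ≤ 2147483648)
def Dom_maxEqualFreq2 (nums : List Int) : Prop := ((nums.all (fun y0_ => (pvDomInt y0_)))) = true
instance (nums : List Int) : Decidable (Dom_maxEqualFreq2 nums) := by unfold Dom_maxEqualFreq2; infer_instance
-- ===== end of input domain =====

-- B replaces A's incrementally maintained Counter/freqCounter/maxFreq state by a plain
-- backward scan over prefix lengths that recomputes the frequency multiset from scratch
-- (simpler code, not faster).

-- ===== PORT A =====
-- Python's inner `check` reads the closure variable `i`; at every call site i + 1 == size,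
-- so using `size` for both occurrences is exact.
def aCheck (size maxFreq : Int) (freqCounter : PySem.Dict Int Int) : Bool :=
  if maxFreq == 1 then true
  else if (freqCounter.getD maxFreq 0 * maxFreq + freqCounter.getD (maxFreq - 1) 0 * (maxFreq - 1) == size)
          && (freqCounter.getD maxFreq 0 == 1) then true
  else if (freqCounter.getD 1 0 == 1) && (freqCounter.getD maxFreq 0 * maxFreq + 1 == size) then true
  else false

def aStep (st : PySem.Dict Int Int × PySem.Dict Int Int × Int × Int) (p : Int × Int) :
    PySem.Dict Int Int × PySem.Dict Int Int × Int × Int :=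
  let counter := st.1.modify p.2 0 (· + 1)
  let c := counter.getD p.2 0
  let freqC := st.2.1.modify c 0 (· + 1)
  let freqC := if c != 1 then freqC.modify (c - 1) 0 (· - 1) else freqC
  let maxFreq := max st.2.2.2 c
  let res := if aCheck (p.1 + 1) maxFreq freqC then p.1 + 1 else st.2.2.1
  (counter, freqC, res, maxFreq)

def maxEqualFreq2 (nums : List Int) : Int :=
  ((PySem.List.enumerate nums 0).foldl aStep (PySem.Dict.empty, PySem.Dict.empty, 0, 0)).2.2.1

-- ===== PORT B =====
def bValid (nums : List Int) (L : Int) : Bool :=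
  let pre := PySem.List.slice nums none (some L)                 -- nums[:L]
  let vals := (PySem.Dict.counter pre).values                    -- list(Counter(pre).values())
  match PySem.List.max? vals (fun v => v) with
  | none => false   -- max([]) raises in Python; unreachable here (bValid is only applied to L ≥ 1)
  | some m =>
      (m == 1)
      || (((vals.count m : Int) == 1)
            && ((vals.count m : Int) * m + (vals.count (m - 1) : Int) * (m - 1) == L))
      || (((vals.count 1 : Int) == 1) && ((vals.count m : Int) * m + 1 == L))

def bLoop (nums : List Int) : List Int → Int
  | [] => 0
  | L :: rest => if bValid nums L then L else bLoop nums rest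

def maxEqualFreq2_alt (nums : List Int) : Int :=
  bLoop nums (PySem.List.pyRange (PySem.List.len nums) 0 (-1))

-- ===== PRECONDITION & SPEC =====
def Spec_maxEqualFreq2 (nums : List Int) (out : Int) : Prop := out = maxEqualFreq2_alt nums
instance (nums : List Int) (out : Int) : Decidable (Spec_maxEqualFreq2 nums out) := by unfold Spec_maxEqualFreq2; infer_instance

-- ===== CLAIM (what is proved, stated in full; the proofs are below) =====
def Claim_equal_maxEqualFreq2 : Prop := ∀ (nums : List Int), Dom_maxEqualFreq2 nums → Spec_maxEqualFreq2 nums (maxEqualFreq2 nums)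

-- ===== LEMMAS AND PROOFS =====

-- The multiset of frequencies of a prefix, and the derived quantities both programs decide on.
def valsOf (p : List Int) : List Int :=
  (PySem.List.dedup p).map (fun x => (p.count x : Int))

def maxOf (p : List Int) : Int := (valsOf p).foldl max 0

def goodP (p : List Int) : Bool :=
  (maxOf p == 1)
  || ((((valsOf p).count (maxOf p) : Int) == 1)
        && (((valsOf p).count (maxOf p) : Int) * maxOf p
              + ((valsOf p).count (maxOf p - 1) : Int) * (maxOf p - 1) == (p.length : Int)))
  || ((((valsOf p).count 1 : Int) == 1)
        && (((valsOf p).count (maxOf p) : Int) * maxOf p + 1 == (p.length : Int)))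

-- Largest good prefix length among 1..k (0 if none).
def LG (nums : List Int) : Nat → Int
  | 0 => 0
  | k + 1 => if goodP (nums.take (k + 1)) then ((k + 1 : Nat) : Int) else LG nums k

-- foldl max basics
lemma fm_le (l : List Int) (a b : Int) (ha : a ≤ b) (h : ∀ y ∈ l, y ≤ b) : l.foldl max a ≤ b := by
  induction l generalizing a with
  | nil => simpa using ha
  | cons x t ih =>
    exact ih (max a x) (max_le ha (h x (by simp))) (fun y hy => h y (by simp [hy]))

lemma le_fm_init (l : List Int) (a : Int) : a ≤ l.foldl max a := by
  induction l generalizing a with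
  | nil => simp
  | cons x t ih => exact le_trans (le_max_left a x) (ih (max a x))

lemma le_fm_mem (l : List Int) (a y : Int) (hy : y ∈ l) : y ≤ l.foldl max a := by
  induction l generalizing a with
  | nil => simp at hy
  | cons x t ih =>
    rcases List.mem_cons.mp hy with h | h
    · subst h; exact le_trans (le_max_right a y) (le_fm_init t _)
    · exact ih _ h

lemma fm_attain (l : List Int) (a : Int) : l.foldl max a = a ∨ l.foldl max a ∈ l := by
  induction l generalizing a with
  | nil => left; rfl
  | cons x t ih =>
    rcases ih (max a x) with h | h
    · simp only [List.foldl_cons, h]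
      rcases max_choice a x with h' | h'
      · left; exact h'
      · right; simp [h']
    · right; simp [List.foldl_cons, h]

-- counting in a map over a nodup list when the function changes at exactly one key
lemma count_map_update (ks : List Int) (hnd : ks.Nodup) (x : Int) (hx : x ∈ ks)
    (f g : Int → Int) (h : ∀ y ∈ ks, y ≠ x → g y = f y) (v : Int) :
    ((ks.map g).count v : Int) + (if f x = v then 1 else 0)
      = ((ks.map f).count v : Int) + (if g x = v then 1 else 0) := by
  induction ks with
  | nil => simp at hx
  | cons a t ih =>
    have hnd' : t.Nodup := (List.nodup_cons.mp hnd).2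
    have hna : a ∉ t := (List.nodup_cons.mp hnd).1
    rcases List.mem_cons.mp hx with hax | hxt
    · subst hax
      have hmap : t.map g = t.map f := by
        apply List.map_congr_left
        intro y hy
        exact h y (List.mem_cons_of_mem _ hy) (fun hyx => hna (hyx ▸ hy))
      simp only [List.map_cons, List.count_cons, hmap, beq_iff_eq]
      push_cast
      split_ifs <;> omega
    · have hax : a ≠ x := fun hax => hna (hax ▸ hxt)
      have hga : g a = f a := h a (List.mem_cons_self) hax
      have := ih hnd' hxt (fun y hy hyx => h y (List.mem_cons_of_mem _ hy) hyx)
      simp only [List.map_cons, List.count_cons, hga, beq_iff_eq]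
      push_cast at this ⊢
      split_ifs <;> omega


-- dedup of an append of one element
lemma dedup_append_not_mem (p : List Int) (x : Int) (hx : x ∉ p) :
    PySem.List.dedup (p ++ [x]) = PySem.List.dedup p ++ [x] := by
  rw [PySem.List.dedup_eq_ofList, PySem.List.dedup_eq_ofList,
    PySem.Set.ofList_eq_foldl (p ++ [x]), List.foldl_append, ← PySem.Set.ofList_eq_foldl]
  show PySem.Set.add (PySem.Set.ofList p) x = _
  unfold PySem.Set.add
  rw [if_neg]
  simp only [Bool.not_eq_true]
  rw [← Bool.not_eq_true, PySem.Set.contains_iff]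
  rw [PySem.Set.mem_ofList]
  exact hx


lemma dedup_append_mem (p : List Int) (x : Int) (hx : x ∈ p) :
    PySem.List.dedup (p ++ [x]) = PySem.List.dedup p := by
  rw [PySem.List.dedup_eq_ofList, PySem.List.dedup_eq_ofList,
    PySem.Set.ofList_eq_foldl (p ++ [x]), List.foldl_append, ← PySem.Set.ofList_eq_foldl]
  show PySem.Set.add (PySem.Set.ofList p) x = _
  unfold PySem.Set.add
  rw [if_pos]
  rw [PySem.Set.contains_iff, PySem.Set.mem_ofList]
  exact hx


lemma valsOf_append_not_mem (p : List Int) (x : Int) (hx : x ∉ p) :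
    valsOf (p ++ [x]) = valsOf p ++ [1] := by
  unfold valsOf
  rw [dedup_append_not_mem p x hx, List.map_append]
  congr 1
  · apply List.map_congr_left
    intro y hy
    have hyp : y ∈ p := by
      rw [PySem.List.dedup_eq_ofList, PySem.Set.mem_ofList] at hy
      exact hy
    have hyx : y ≠ x := fun hyx => hx (hyx ▸ hyp)
    simp [List.count_append, List.count_singleton]
    exact fun h => hyx (Eq.symm h)
  · simp [List.count_append, List.count_eq_zero_of_not_mem hx]


lemma count_valsOf_append_mem (p : List Int) (x : Int) (hx : x ∈ p) (v : Int) :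
    ((valsOf (p ++ [x])).count v : Int) + (if (p.count x : Int) = v then 1 else 0)
      = ((valsOf p).count v : Int) + (if (p.count x : Int) + 1 = v then 1 else 0) := by
  unfold valsOf
  rw [dedup_append_mem p x hx]
  have hnd : (PySem.List.dedup p).Nodup := by
    rw [PySem.List.dedup_eq_ofList]; exact PySem.Set.nodup_ofList p
  have hxd : x ∈ PySem.List.dedup p := by
    rw [PySem.List.dedup_eq_ofList, PySem.Set.mem_ofList]; exact hx
  have key := count_map_update (PySem.List.dedup p) hnd x hxd
    (fun y => ((p.count y : Nat) : Int)) (fun y => (((p ++ [x]).count y : Nat) : Int))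
    (by
      intro y hy hyx
      simp [List.count_append, List.count_singleton]
      exact fun h => hyx (Eq.symm h))
    v
  have hx1 : (((p ++ [x]).count x : Nat) : Int) = (p.count x : Int) + 1 := by
    simp [List.count_append]
  beta_reduce at key
  rw [hx1] at key
  exact key


lemma mem_valsOf_pos (p : List Int) (v : Int) (hv : v ∈ valsOf p) : 1 ≤ v := by
  unfold valsOf at hv
  rcases List.mem_map.mp hv with ⟨y, hy, hyv⟩
  have hyp : y ∈ p := by
    rw [PySem.List.dedup_eq_ofList, PySem.Set.mem_ofList] at hy
    exact hy
  have : 1 ≤ p.count y := List.one_le_count_iff.mpr hyp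
  omega


lemma maxOf_nonneg (p : List Int) : 0 ≤ maxOf p := le_fm_init _ _

lemma maxOf_pos (p : List Int) (hp : p ≠ []) : 1 ≤ maxOf p := by
  rcases List.exists_mem_of_ne_nil p hp with ⟨a, ha⟩
  have had : a ∈ PySem.List.dedup p := by
    rw [PySem.List.dedup_eq_ofList, PySem.Set.mem_ofList]; exact ha
  have hmem : ((p.count a : Nat) : Int) ∈ valsOf p := List.mem_map_of_mem had
  have h1 : (1 : Int) ≤ ((p.count a : Nat) : Int) := mem_valsOf_pos p _ hmem
  exact le_trans h1 (le_fm_mem _ _ _ hmem)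


lemma maxOf_append (p : List Int) (x : Int) :
    maxOf (p ++ [x]) = max (maxOf p) ((p.count x : Int) + 1) := by
  by_cases hx : x ∈ p
  · -- dedup unchanged; the entry for x rises from count to count+1
    have hdd : PySem.List.dedup (p ++ [x]) = PySem.List.dedup p := dedup_append_mem p x hx
    have hxd : x ∈ PySem.List.dedup p := by
      rw [PySem.List.dedup_eq_ofList, PySem.Set.mem_ofList]; exact hx
    have hcx : (((p ++ [x]).count x : Nat) : Int) = (p.count x : Int) + 1 := by
      simp [List.count_append]
    apply le_antisymm
    · apply fm_le
      · have h0 : (0 : Int) ≤ maxOf p := maxOf_nonneg p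
        exact le_trans h0 (le_max_left _ _)
      · intro z hz
        rcases List.mem_map.mp hz with ⟨y, hy, hyz⟩
        rw [hdd] at hy
        by_cases hyx : y = x
        · subst hyx
          rw [← hyz, hcx]
          exact le_max_right _ _
        · have : (((p ++ [x]).count y : Nat) : Int) = ((p.count y : Nat) : Int) := by
            simp [List.count_append, List.count_singleton]
            exact fun h => hyx (Eq.symm h)
          have hmem : ((p.count y : Nat) : Int) ∈ valsOf p := by
            unfold valsOf
            exact List.mem_map_of_mem hy
          rw [← hyz, this]
          exact le_trans (le_fm_mem (valsOf p) 0 _ hmem) (le_max_left (maxOf p) _)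
    · apply max_le
      · rcases fm_attain (valsOf p) 0 with h0 | hmem
        · unfold maxOf
          rw [h0]
          exact maxOf_nonneg _
        · rcases List.mem_map.mp hmem with ⟨y, hy, hyz⟩
          have h1 : ((p.count y : Nat) : Int) ≤ (((p ++ [x]).count y : Nat) : Int) := by
            simp [List.count_append]
          have h2 : (((p ++ [x]).count y : Nat) : Int) ∈ valsOf (p ++ [x]) := by
            unfold valsOf
            rw [hdd]
            exact List.mem_map_of_mem hy
          unfold maxOf
          rw [← hyz]
          exact le_trans h1 (le_fm_mem (valsOf (p ++ [x])) 0 _ h2)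
      · have h2 : ((p.count x : Int) + 1) ∈ valsOf (p ++ [x]) := by
          rw [← hcx]
          unfold valsOf
          rw [hdd]
          exact List.mem_map_of_mem hxd
        exact le_fm_mem (valsOf (p ++ [x])) 0 _ h2
  · have hv : valsOf (p ++ [x]) = valsOf p ++ [1] := valsOf_append_not_mem p x hx
    have hc0 : (p.count x : Int) = 0 := by
      simp [List.count_eq_zero_of_not_mem hx]
    unfold maxOf
    rw [hv, List.foldl_append, hc0]
    norm_num


-- check equality between A's dict-based test and the abstract test
lemma check_eq (p : List Int) (hp : p ≠ []) (f : PySem.Dict Int Int)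
    (hf : ∀ v : Int, 1 ≤ v → f.getD v 0 = ((valsOf p).count v : Int)) :
    aCheck (p.length : Int) (maxOf p) f = goodP p := by
  have hm : 1 ≤ maxOf p := maxOf_pos p hp
  unfold aCheck goodP
  by_cases h1 : maxOf p = 1
  · simp [h1]
  · have hb1 : (maxOf p == 1) = false := by
      simp [h1]
    rw [hf (maxOf p) (by omega), hf (maxOf p - 1) (by omega), hf 1 (by omega), hb1]
    have hbool : ∀ a b e : Bool,
        (if (a && b) = true then true else if e = true then true else false)
          = ((false || (b && a)) || e) := by decide
    exact hbool _ _ _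


-- A's loop invariant
lemma aLoop_inv (nums : List Int) :
    ∀ (rest pref : List Int) (f : PySem.Dict Int Int) (r m : Int),
      nums = pref ++ rest →
      (∀ v : Int, 1 ≤ v → f.getD v 0 = ((valsOf pref).count v : Int)) →
      m = maxOf pref →
      r = LG nums pref.length →
      ((PySem.List.enumerate rest (pref.length : Int)).foldl aStep
          (PySem.Dict.counter pref, f, r, m)).2.2.1
        = LG nums (pref.length + rest.length) := by
  intro rest
  induction rest with
  | nil =>
    intro pref f r m hnums hf hm hr
    simpa [PySem.List.enumerate_nil] using hr
  | cons x rest' ih =>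
    intro pref f r m hnums hf hm hr
    rw [PySem.List.enumerate_cons, List.foldl_cons]
    have hcnt : (PySem.Dict.counter pref).modify x 0 (· + 1) = PySem.Dict.counter (pref ++ [x]) :=
      (PySem.Dict.counter_append_singleton pref x).symm
    have hc : (PySem.Dict.counter (pref ++ [x])).getD x 0 = (pref.count x : Int) + 1 := by
      rw [PySem.Dict.getD_counter]
      simp [List.count_append]
    have hstep :
        aStep (PySem.Dict.counter pref, f, r, m) ((pref.length : Int), x)
          = (PySem.Dict.counter (pref ++ [x]),
             (if ((pref.count x : Int) + 1) != 1 then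
                (f.modify ((pref.count x : Int) + 1) 0 (· + 1)).modify ((pref.count x : Int) + 1 - 1) 0 (· - 1)
              else f.modify ((pref.count x : Int) + 1) 0 (· + 1)),
             (if aCheck ((pref.length : Int) + 1) (max m ((pref.count x : Int) + 1))
                  (if ((pref.count x : Int) + 1) != 1 then
                     (f.modify ((pref.count x : Int) + 1) 0 (· + 1)).modify ((pref.count x : Int) + 1 - 1) 0 (· - 1)
                   else f.modify ((pref.count x : Int) + 1) 0 (· + 1))
              then (pref.length : Int) + 1 else r),
             max m ((pref.count x : Int) + 1)) := by
      simp only [aStep, hcnt, hc]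
    rw [hstep]
    -- invariants for the extended prefix pref ++ [x]
    have hfx' : ∀ v : Int, 1 ≤ v →
        (if ((pref.count x : Int) + 1) != 1 then
           (f.modify ((pref.count x : Int) + 1) 0 (· + 1)).modify ((pref.count x : Int) + 1 - 1) 0 (· - 1)
         else f.modify ((pref.count x : Int) + 1) 0 (· + 1)).getD v 0
          = ((valsOf (pref ++ [x])).count v : Int) := by
      intro v hv
      by_cases hx : x ∈ pref
      · have hcp : 1 ≤ pref.count x := List.one_le_count_iff.mpr hx
        have hne : (((pref.count x : Int) + 1) != 1) = true := by
          simp only [bne_iff_ne, ne_eq]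
          omega
        rw [if_pos hne]
        have key := count_valsOf_append_mem pref x hx v
        have hsimp : (pref.count x : Int) + 1 - 1 = (pref.count x : Int) := by ring
        rw [hsimp]
        simp only [PySem.Dict.getD_modify]
        by_cases hv1 : v = (pref.count x : Int)
        · subst hv1
          rw [if_pos rfl, if_neg (by omega)]
          rw [hf _ (by omega)]
          rw [if_pos rfl, if_neg (by omega)] at key
          omega
        · rw [if_neg hv1]
          by_cases hv2 : v = (pref.count x : Int) + 1
          · subst hv2
            rw [if_pos rfl, hf _ (by omega)]
            rw [if_neg (by omega), if_pos rfl] at key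
            omega
          · rw [if_neg hv2, hf v hv]
            rw [if_neg (by omega), if_neg (by omega)] at key
            omega
      · have hcp : pref.count x = 0 := List.count_eq_zero_of_not_mem hx
        have hne : (((pref.count x : Int) + 1) != 1) = false := by
          simp only [bne_eq_false_iff_eq]
          rw [hcp]
          norm_num
        rw [if_neg (by simp [hne])]
        have hc1 : (pref.count x : Int) + 1 = 1 := by
          rw [hcp]
          norm_num
        rw [hc1, PySem.Dict.getD_modify]
        have hvv : valsOf (pref ++ [x]) = valsOf pref ++ [1] := valsOf_append_not_mem pref x hx
        rw [hvv]
        have hcnt1 : (valsOf pref ++ [1]).count v = (valsOf pref).count v + if (1 : Int) = v then 1 else 0 := by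
          simp [List.count_append, List.count_singleton]
        rw [hcnt1]
        by_cases hv1 : v = 1
        · subst hv1
          rw [if_pos rfl, hf 1 (by omega), if_pos rfl]
          push_cast
          omega
        · rw [if_neg hv1, hf v hv, if_neg (fun h => hv1 (Eq.symm h))]
          push_cast
          omega
    have hm' : max m ((pref.count x : Int) + 1) = maxOf (pref ++ [x]) := by
      rw [hm, maxOf_append]
    have hpx : nums.take (pref.length + 1) = pref ++ [x] := by
      rw [hnums]
      rw [show pref.length + 1 = pref.length + 1 from rfl]
      rw [List.take_append]
      simp
    have hcheck :
        aCheck ((pref.length : Int) + 1) (max m ((pref.count x : Int) + 1))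
            (if ((pref.count x : Int) + 1) != 1 then
               (f.modify ((pref.count x : Int) + 1) 0 (· + 1)).modify ((pref.count x : Int) + 1 - 1) 0 (· - 1)
             else f.modify ((pref.count x : Int) + 1) 0 (· + 1))
          = goodP (pref ++ [x]) := by
      have hlen : ((pref ++ [x]).length : Int) = (pref.length : Int) + 1 := by
        push_cast [List.length_append, List.length_singleton]
        ring
      rw [← hlen, hm']
      exact check_eq (pref ++ [x]) (by simp) _ hfx'
    have hr' :
        (if aCheck ((pref.length : Int) + 1) (max m ((pref.count x : Int) + 1))
             (if ((pref.count x : Int) + 1) != 1 then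
                (f.modify ((pref.count x : Int) + 1) 0 (· + 1)).modify ((pref.count x : Int) + 1 - 1) 0 (· - 1)
              else f.modify ((pref.count x : Int) + 1) 0 (· + 1))
         then (pref.length : Int) + 1 else r)
          = LG nums (pref ++ [x]).length := by
      rw [hcheck]
      rw [List.length_append, List.length_singleton]
      show _ = LG nums (pref.length + 1)
      rw [LG, hpx, hr]
      by_cases hg : goodP (pref ++ [x]) = true
      · rw [if_pos hg, if_pos hg]
        push_cast
        ring
      · rw [if_neg hg, if_neg hg]
    have hnums' : nums = (pref ++ [x]) ++ rest' := by
      rw [hnums, List.append_assoc]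
      rfl
    have := ih (pref ++ [x]) _ _ _ hnums' hfx' hm' hr'
    have hlen1 : ((pref ++ [x]).length : Int) = (pref.length : Int) + 1 := by
      push_cast [List.length_append, List.length_singleton]
      ring
    rw [hlen1] at this
    rw [this]
    congr 1
    simp [List.length_append]
    omega


lemma a_eq_LG (nums : List Int) : maxEqualFreq2 nums = LG nums nums.length := by
  have h := aLoop_inv nums nums [] PySem.Dict.empty 0 0 (by simp)
    (by
      intro v hv
      simp [valsOf, PySem.Dict.getD_empty, PySem.List.dedup_eq_ofList]) rfl rfl
  simp only [List.length_nil, Nat.cast_zero, Nat.zero_add] at h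
  exact h


lemma bValid_eq (nums : List Int) (L : Nat) (h1 : 1 ≤ L) (h2 : L ≤ nums.length) :
    bValid nums (L : Int) = goodP (nums.take L) := by
  simp only [bValid]
  rw [PySem.List.slice_to_natCast]
  have hpre : nums.take L ≠ [] := by
    apply List.ne_nil_of_length_pos
    rw [List.length_take]
    omega
  have hvals : (PySem.Dict.counter (nums.take L)).values = valsOf (nums.take L) := by
    simp only [PySem.Dict.values, PySem.Dict.items_counter]
    unfold valsOf
    rw [PySem.List.dedup_eq_ofList]
    simp [List.map_map, Function.comp]
  rw [hvals]
  have hvne : valsOf (nums.take L) ≠ [] := by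
    rcases List.exists_mem_of_ne_nil _ hpre with ⟨a, ha⟩
    have had : a ∈ PySem.List.dedup (nums.take L) := by
      rw [PySem.List.dedup_eq_ofList, PySem.Set.mem_ofList]
      exact ha
    intro hnil
    have : ((List.count a (nums.take L) : Nat) : Int) ∈ valsOf (nums.take L) :=
      List.mem_map_of_mem had
    rw [hnil] at this
    simp at this
  rcases List.exists_cons_of_ne_nil hvne with ⟨v0, vt, hv⟩
  rw [hv, PySem.List.max?_id_cons]
  have hv0 : (1 : Int) ≤ v0 := mem_valsOf_pos _ v0 (hv ▸ List.mem_cons_self)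
  have hmax : vt.foldl max v0 = maxOf (nums.take L) := by
    unfold maxOf
    rw [hv, List.foldl_cons, max_eq_right (by omega)]
  have hlen : ((nums.take L).length : Int) = (L : Int) := by
    rw [List.length_take]
    push_cast
    omega
  simp only []
  rw [hmax, ← hv]
  unfold goodP
  rw [hlen]


lemma b_eq_LG (nums : List Int) : maxEqualFreq2_alt nums = LG nums nums.length := by
  unfold maxEqualFreq2_alt
  rw [PySem.List.len_eq]
  suffices h : ∀ k : Nat, k ≤ nums.length →
      bLoop nums (PySem.List.pyRange (k : Int) 0 (-1)) = LG nums k from h nums.length le_rfl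
  intro k
  induction k with
  | zero =>
    intro _
    rw [PySem.List.pyRange_neg_one_eq_nil (by norm_num)]
    rfl
  | succ n ihn =>
    intro hk
    rw [PySem.List.pyRange_neg_one_cons (by push_cast; omega)]
    have hcast : ((n + 1 : Nat) : Int) - 1 = (n : Int) := by
      push_cast
      ring
    rw [hcast]
    show (if bValid nums ((n + 1 : Nat) : Int) then ((n + 1 : Nat) : Int)
          else bLoop nums (PySem.List.pyRange (n : Int) 0 (-1))) = LG nums (n + 1)
    rw [bValid_eq nums (n + 1) (by omega) hk, ihn (by omega)]
    rfl


-- ===== VERDICT (by name: the statement is the Claim_ definition above) =====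
theorem maxEqualFreq2_spec : Claim_equal_maxEqualFreq2 := by
  intro nums _
  unfold Spec_maxEqualFreq2
  rw [a_eq_LG, b_eq_LG]
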